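-- pv_equiv track=rewrite | github.com/xianiax02/mila_coding_study | 프로그래머스/3/388354. 홀짝트리/홀짝트리.py | solution
-- ===== SOURCE A (Python) =====
-- def solution(nodes, edges):
--     parent = {node: node for node in nodes}
--     degree = {node: 0 for node in nodes}
--
--     # 1. 차수 계산 및 Union-Find 준비
--     for a, b in edges:
--         degree[a] += 1
--         degree[b] += 1
--
--     def find(i):
--         if parent[i] == i:
--             return i
--         parent[i] = find(parent[i]) # 경로 압축 (Path Compression)
--         return parent[i]
--
--     def union(i, j):
--         root_i = find(i)
--         root_j = find(j)
--         if root_i != root_j: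
--             parent[root_i] = root_j
--
--     # 2. 모든 간선을 합치기 (덩어리 나누기)
--     for a, b in edges:
--         union(a, b)
--
--     # 3. 루트별로 타입 개수 집계
--     # 결과 구조: {root_node: [type0_count, type1_count]}
--     comp_stats = {}
--
--     for node in nodes:
--         root = find(node)
--         if root not in comp_stats:
--             comp_stats[root] = [0, 0]
--
--         # 타입 판별 로직 (v % 2 == degree % 2 이면 Type 0)
--         if node % 2 == degree[node] % 2:
--             comp_stats[root][0] += 1 # Type 0 추가
--         else:
--             comp_stats[root][1] += 1 # Type 1 추가
--
--     # 4. 최종 트리 개수 카운트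
--     h_tree, r_tree = 0, 0
--     for t0, t1 in comp_stats.values():
--         if t0 == 1: h_tree += 1
--         if t1 == 1: r_tree += 1
--
--     return [h_tree, r_tree]
-- ===== SOURCE B (Python) =====
-- def solution(nodes, edges):
--     # Flat component-label map merged by relabeling (instead of union-find),
--     # degree tallied in the same single pass over edges.
--     comp = {v: v for v in nodes}
--     degree = {v: 0 for v in nodes}
--
--     for a, b in edges:
--         degree[a] += 1
--         degree[b] += 1
--         ca, cb = comp[a], comp[b]
--         if ca != cb:
--             comp = {v: (cb if c == ca else c) for v, c in comp.items()}
--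
--     stats = {}
--     for v in nodes:
--         c = comp[v]
--         if c not in stats:
--             stats[c] = (0, 0)
--         t0, t1 = stats[c]
--         if v % 2 == degree[v] % 2:
--             stats[c] = (t0 + 1, t1)
--         else:
--             stats[c] = (t0, t1 + 1)
--
--     h_tree = sum(1 for t0, _ in stats.values() if t0 == 1)
--     r_tree = sum(1 for _, t1 in stats.values() if t1 == 1)
--     return [h_tree, r_tree]
-- ===== Notes on version B (the rewrite author's own statement) =====
-- stated objective: alternative
-- what changed: Replaces A's recursive path-compressing union-find (two edge passes plus per-node find) by a flat component-label dict merged by whole-map relabeling in a single edge pass that also tallies degrees, and counts qualifying components with two generator sums.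
import Mathlib
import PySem

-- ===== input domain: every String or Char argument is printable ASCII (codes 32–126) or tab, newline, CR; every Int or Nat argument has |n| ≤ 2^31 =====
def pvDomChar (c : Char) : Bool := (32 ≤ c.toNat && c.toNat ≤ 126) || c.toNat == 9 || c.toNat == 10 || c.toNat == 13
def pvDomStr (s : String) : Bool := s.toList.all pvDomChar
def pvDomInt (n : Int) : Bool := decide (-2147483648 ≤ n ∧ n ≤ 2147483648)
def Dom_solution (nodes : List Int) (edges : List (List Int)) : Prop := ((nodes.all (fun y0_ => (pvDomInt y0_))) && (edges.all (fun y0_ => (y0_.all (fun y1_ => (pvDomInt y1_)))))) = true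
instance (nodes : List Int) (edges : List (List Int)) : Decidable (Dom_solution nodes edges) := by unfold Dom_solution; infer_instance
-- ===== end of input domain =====

-- B replaces A's recursive path-compressing union-find by a flat component-label
-- map merged by relabeling, tallies degrees in the same single pass over the
-- edges, and counts the qualifying components with two countP passes
-- (objective: alternative — structurally different, not claimed faster).

-- ===== PORT A =====
-- find(i) with path compression; Python's recursion carries no fuel, the Nat
-- fuel only makes the recursion structural (on Pre_ inputs the parent chains are
-- strictly shorter than the fuel solution passes, so the 0-case is never hit).
def findA : Nat → PySem.Dict Int Int → Int → Int × PySem.Dict Int Int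
  | 0, p, i => (i, p)
  | fuel + 1, p, i =>
    let pi := p.getD i i          -- parent[i] (always a present key on Pre_ inputs)
    if pi = i then (i, p)
    else
      let rp := findA fuel p pi   -- parent[i] = find(parent[i])
      (rp.1, rp.2.insert i rp.1)  -- return parent[i]

def unionA (fuel : Nat) (p : PySem.Dict Int Int) (i j : Int) : PySem.Dict Int Int :=
  let r1 := findA fuel p i
  let r2 := findA fuel r1.2 j
  if r1.1 ≠ r2.1 then r2.2.insert r1.1 r2.1 else r2.2

-- the body of A's first edge loop: degree[a] += 1; degree[b] += 1
def degStep (d : PySem.Dict Int Int) (e : List Int) : PySem.Dict Int Int :=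
  match e with
  | [a, b] =>
    let d1 := d.insert a (d.getD a 0 + 1)
    d1.insert b (d1.getD b 0 + 1)
  | _ => d                        -- unpacking raises unless len == 2: excluded by Pre_

def solution (nodes : List Int) (edges : List (List Int)) : List Int :=
  let parent0 : PySem.Dict Int Int := nodes.foldl (fun d v => d.insert v v) PySem.Dict.empty
  let degree0 : PySem.Dict Int Int := nodes.foldl (fun d v => d.insert v 0) PySem.Dict.empty
  let degree := edges.foldl degStep degree0
  let F := nodes.length + 1
  let parent := edges.foldl (fun p e => match e with | [a, b] => unionA F p a b | _ => p) parent0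
  -- comp_stats: the Python mutates a two-element list [t0, t1]; ported as a pair
  let sp := nodes.foldl (fun (sp : PySem.Dict Int (Int × Int) × PySem.Dict Int Int) v =>
      let rp := findA F sp.2 v
      let s1 := if sp.1.contains rp.1 then sp.1 else sp.1.insert rp.1 (0, 0)
      let s2 := if PySem.Int.mod v 2 = PySem.Int.mod (degree.getD v 0) 2
        then s1.modify rp.1 (0, 0) (fun t => (t.1 + 1, t.2))
        else s1.modify rp.1 (0, 0) (fun t => (t.1, t.2 + 1))
      (s2, rp.2)) (PySem.Dict.empty, parent)
  let hr := sp.1.values.foldl (fun (hr : Int × Int) t =>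
      ((if t.1 = 1 then hr.1 + 1 else hr.1), (if t.2 = 1 then hr.2 + 1 else hr.2))) (0, 0)
  [hr.1, hr.2]

-- ===== PORT B =====
-- {v: (cb if c == ca else c) for v, c in comp.items()}
def relabelB (cm : PySem.Dict Int Int) (ca cb : Int) : PySem.Dict Int Int :=
  cm.items.foldl (fun d p => d.insert p.1 (if p.2 = ca then cb else p.2)) PySem.Dict.empty

-- one edge of B's single pass: bump both degrees, then merge the two labels
def stepB (st : PySem.Dict Int Int × PySem.Dict Int Int) (e : List Int) :
    PySem.Dict Int Int × PySem.Dict Int Int :=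
  match e with
  | [a, b] =>
    let dg1 := st.1.insert a (st.1.getD a 0 + 1)
    let dg2 := dg1.insert b (dg1.getD b 0 + 1)
    let ca := st.2.getD a a
    let cb := st.2.getD b b
    (dg2, if ca ≠ cb then relabelB st.2 ca cb else st.2)
  | _ => st

def solution_alt (nodes : List Int) (edges : List (List Int)) : List Int :=
  let comp0 : PySem.Dict Int Int := nodes.foldl (fun d v => d.insert v v) PySem.Dict.empty
  let degree0 : PySem.Dict Int Int := nodes.foldl (fun d v => d.insert v 0) PySem.Dict.empty
  let st := edges.foldl stepB (degree0, comp0)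
  let stats := nodes.foldl (fun (s : PySem.Dict Int (Int × Int)) v =>
      let c := st.2.getD v v
      let s1 := if s.contains c then s else s.insert c (0, 0)
      let t := s1.getD c (0, 0)
      if PySem.Int.mod v 2 = PySem.Int.mod (st.1.getD v 0) 2
        then s1.insert c (t.1 + 1, t.2)
        else s1.insert c (t.1, t.2 + 1)) PySem.Dict.empty
  [(stats.values.countP (fun t => t.1 == 1) : Int), (stats.values.countP (fun t => t.2 == 1) : Int)]

-- ===== PRECONDITION & SPEC =====
-- Pre_ excludes exactly the inputs where A raises: an edge that is not a pair
-- (ValueError on unpacking) or with an endpoint absent from nodes (KeyError).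
def Pre_solution (nodes : List Int) (edges : List (List Int)) : Prop :=
  ∀ e ∈ edges, e.length = 2 ∧ ∀ x ∈ e, x ∈ nodes
instance (nodes : List Int) (edges : List (List Int)) : Decidable (Pre_solution nodes edges) := by
  unfold Pre_solution; infer_instance

def pvWitness_solution : List Int × List (List Int) := ([1, 2, 4, 7], [[1, 2], [2, 4]])

def Spec_solution (nodes : List Int) (edges : List (List Int)) (out : List Int) : Prop := out = solution_alt nodes edges
instance (nodes : List Int) (edges : List (List Int)) (out : List Int) : Decidable (Spec_solution nodes edges out) := by unfold Spec_solution; infer_instance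

-- ===== CLAIM (what is proved, stated in full; the proofs are below) =====
def Claim_equal_solution : Prop := ∀ (nodes : List Int) (edges : List (List Int)), Dom_solution nodes edges → Pre_solution nodes edges → Spec_solution nodes edges (solution nodes edges)

-- ===== LEMMAS AND PROOFS =====

-- abbreviation used only in proofs: the value the Python reads as d[k] (k a key)
def pf (d : PySem.Dict Int Int) (k : Int) : Int := d.getD k k

-- the invariant tying A's parent forest p to B's label map c, with an explicit
-- height witness h for the strict decrease along parent chains
def INV (K : List Int) (h : Int → Nat) (p c : PySem.Dict Int Int) : Prop :=
  p.keys = K ∧ c.keys = K ∧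
  (∀ k ∈ K, pf p k ∈ K) ∧
  (∀ k ∈ K, pf c (pf p k) = pf c k) ∧
  (∀ k ∈ K, pf p k = k → pf c k = k) ∧
  (∀ k ∈ K, pf c k ∈ K ∧ pf p (pf c k) = pf c k) ∧
  (∀ k ∈ K, pf p k ≠ k → h (pf p k) < h k)

-- proof-side projection of B's edge pass onto the comp component
def compStep (c : PySem.Dict Int Int) (e : List Int) : PySem.Dict Int Int :=
  match e with
  | [a, b] =>
    if c.getD a a ≠ c.getD b b then relabelB c (c.getD a a) (c.getD b b) else c
  | _ => c

lemma pf_not_mem {K : List Int} {d : PySem.Dict Int Int} (hk : d.keys = K) {j : Int}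
    (hj : j ∉ K) : pf d j = j := by
  have hc : d.contains j = false := by
    cases hcc : d.contains j with
    | false => rfl
    | true => exact absurd (hk ▸ (PySem.Dict.contains_iff_mem_keys _ _).mp hcc) hj
  exact PySem.Dict.getD_of_not_contains _ _ hc

lemma pf_label_idem {K : List Int} {h : Int → Nat} {p c : PySem.Dict Int Int}
    (hinv : INV K h p c) {k : Int} (hk : k ∈ K) : pf c (pf c k) = pf c k := by
  obtain ⟨_, _, _, _, lab2, rootc, _⟩ := hinv
  exact lab2 _ (rootc k hk).1 (rootc k hk).2

lemma hroot {K : List Int} {h : Int → Nat} {p c : PySem.Dict Int Int}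
    (hinv : INV K h p c) : ∀ n, ∀ k ∈ K, h k < n → pf c k ≠ k → h (pf c k) < h k := by
  obtain ⟨_, _, cl, lab1, lab2, rootc, dec⟩ := hinv
  intro n
  induction n with
  | zero => intro k _ hn; omega
  | succ n ih =>
    intro k hk hn hne
    by_cases hfix : pf p k = k
    · exact absurd (lab2 k hk hfix) hne
    · have hpkK : pf p k ∈ K := cl k hk
      have hlt : h (pf p k) < h k := dec k hk hfix
      have lab : pf c (pf p k) = pf c k := lab1 k hk
      by_cases hcp : pf c (pf p k) = pf p k
      · rw [← lab, hcp]; exact hlt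
      · have := ih (pf p k) hpkK (by omega) hcp
        rw [← lab]; omega

lemma INV_of_mod {K : List Int} {h : Int → Nat} {p p' c : PySem.Dict Int Int}
    (hinv : INV K h p c) (hk : p'.keys = K)
    (hmod : ∀ j, pf p' j = pf p j ∨ pf p' j = pf c j) : INV K h p' c := by
  have hidem : ∀ k ∈ K, pf c (pf c k) = pf c k := fun k hk => pf_label_idem hinv hk
  have hrt := hroot hinv
  obtain ⟨hpk, hck, cl, lab1, lab2, rootc, dec⟩ := hinv
  refine ⟨hk, hck, ?_, ?_, ?_, ?_, ?_⟩
  · intro k hkm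
    rcases hmod k with e | e
    · rw [e]; exact cl k hkm
    · rw [e]; exact (rootc k hkm).1
  · intro k hkm
    rcases hmod k with e | e
    · rw [e]; exact lab1 k hkm
    · rw [e]; exact hidem k hkm
  · intro k hkm hfix
    rcases hmod k with e | e
    · rw [e] at hfix; exact lab2 k hkm hfix
    · rw [e] at hfix; exact hfix
  · intro k hkm
    refine ⟨(rootc k hkm).1, ?_⟩
    rcases hmod (pf c k) with e | e
    · rw [e]; exact (rootc k hkm).2
    · rw [e]; exact hidem k hkm
  · intro k hkm hne
    rcases hmod k with e | e
    · rw [e] at hne ⊢; exact dec k hkm hne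
    · rw [e] at hne ⊢
      exact hrt (h k + 1) k hkm (by omega) hne

lemma findA_spec {K : List Int} (c : PySem.Dict Int Int) (h : Int → Nat) :
    ∀ fuel (p : PySem.Dict Int Int) (k : Int), INV K h p c → k ∈ K →
      (K.filter (fun j => decide (h j < h k))).length < fuel →
      (findA fuel p k).1 = pf c k ∧ INV K h (findA fuel p k).2 c ∧
      (∀ j, pf (findA fuel p k).2 j = pf p j ∨ pf (findA fuel p k).2 j = pf c j) := by
  intro fuel
  induction fuel with
  | zero =>
    intro p k _ _ hcnt
    exact absurd hcnt (Nat.not_lt_zero _)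
  | succ fuel ih =>
    intro p k hinv hk hcnt
    have hinv' := hinv
    obtain ⟨hpk, hck, cl, lab1, lab2, dec, rootc⟩ := hinv'
    have hred : findA (fuel + 1) p k =
        if p.getD k k = k then (k, p)
        else (let rp := findA fuel p (p.getD k k); (rp.1, rp.2.insert k rp.1)) := rfl
    by_cases hfix : p.getD k k = k
    · rw [hred, if_pos hfix]
      exact ⟨(lab2 k hk hfix).symm, hinv, fun j => Or.inl rfl⟩
    · have hkK : pf p k ∈ K := cl k hk
      have hlt : h (pf p k) < h k := rootc k hk hfix
      have hsub : (K.filter (fun j => decide (h j < h (pf p k)))).Sublist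
          (K.filter (fun j => decide (h j < h k))) :=
        List.monotone_filter_right _ (fun a ha => by
          simp only [decide_eq_true_eq] at ha ⊢; omega)
      have hmemf : pf p k ∈ K.filter (fun j => decide (h j < h k)) :=
        List.mem_filter.mpr ⟨hkK, by simp [hlt]⟩
      have hnotin : pf p k ∉ K.filter (fun j => decide (h j < h (pf p k))) := by
        intro hmem
        have := (List.mem_filter.mp hmem).2
        simp at this
      have hlen : (K.filter (fun j => decide (h j < h (pf p k)))).length <
          (K.filter (fun j => decide (h j < h k))).length := by
        rcases Nat.lt_or_ge (K.filter (fun j => decide (h j < h (pf p k)))).length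
            (K.filter (fun j => decide (h j < h k))).length with hlt' | hge
        · exact hlt'
        · exfalso
          have hle := hsub.length_le
          have heq := hsub.eq_of_length (le_antisymm hle hge)
          rw [heq] at hnotin
          exact hnotin hmemf
      obtain ⟨ih1, ih2, ih3⟩ := ih p (pf p k) hinv hkK (by omega)
      have hkeys1 : (findA fuel p (pf p k)).2.keys = K := ih2.1
      have hcontk : (findA fuel p (pf p k)).2.contains k = true :=
        (PySem.Dict.contains_iff_mem_keys _ _).mpr (hkeys1 ▸ hk)
      have hval : (findA fuel p (pf p k)).1 = pf c k := by
        rw [ih1]; exact lab1 k hk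
      have hmod : ∀ j, pf ((findA fuel p (pf p k)).2.insert k (findA fuel p (pf p k)).1) j
          = pf p j ∨ pf ((findA fuel p (pf p k)).2.insert k (findA fuel p (pf p k)).1) j
          = pf c j := by
        intro j
        rw [pf, PySem.Dict.getD_insert]
        by_cases hjk : j = k
        · rw [if_pos hjk, hval, hjk]; exact Or.inr rfl
        · rw [if_neg hjk]; exact ih3 j
      have hkeys2 : ((findA fuel p (pf p k)).2.insert k (findA fuel p (pf p k)).1).keys = K := by
        rw [PySem.Dict.keys_insert_of_contains _ _ hcontk, hkeys1]
      rw [hred, if_neg hfix]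
      exact ⟨hval, INV_of_mod hinv hkeys2 hmod, hmod⟩

lemma relabel_items {cm : PySem.Dict Int Int} (hnd : cm.keys.Nodup) (ca cb : Int) :
    (relabelB cm ca cb).items = cm.items.map (fun p => (p.1, if p.2 = ca then cb else p.2)) := by
  have hnd' : (cm.items.map Prod.fst).Nodup := by
    simpa [PySem.Dict.keys] using hnd
  have := PySem.Dict.items_foldl_insert_fresh (ν := Int) cm.items Prod.fst
    (fun p => if p.2 = ca then cb else p.2) PySem.Dict.empty
    (fun a _ => PySem.Dict.contains_empty a.1) hnd'
  simpa [relabelB, PySem.Dict.empty] using this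

lemma relabel_keys {cm : PySem.Dict Int Int} (hnd : cm.keys.Nodup) (ca cb : Int) :
    (relabelB cm ca cb).keys = cm.keys := by
  simp only [PySem.Dict.keys, relabel_items hnd ca cb, List.map_map]
  rfl

lemma relabel_pf {cm : PySem.Dict Int Int} (hnd : cm.keys.Nodup) (ca cb : Int) {j : Int}
    (hj : j ∈ cm.keys) : pf (relabelB cm ca cb) j = if pf cm j = ca then cb else pf cm j := by
  have hj' : j ∈ cm.items.map Prod.fst := by simpa [PySem.Dict.keys] using hj
  obtain ⟨q, hq, hq1⟩ := List.mem_map.mp hj'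
  have hval : pf cm j = q.2 := by
    have : (j, q.2) ∈ cm.items := by rw [← hq1]; exact hq
    exact PySem.Dict.getD_of_mem_items cm this hnd _
  have hnd2 : (relabelB cm ca cb).keys.Nodup := by rw [relabel_keys hnd]; exact hnd
  have hmem : (j, if q.2 = ca then cb else q.2) ∈ (relabelB cm ca cb).items := by
    rw [relabel_items hnd ca cb]
    exact List.mem_map.mpr ⟨q, hq, by rw [hq1]⟩
  have := PySem.Dict.getD_of_mem_items _ hmem hnd2 j
  rw [pf, this, hval]

lemma unionA_spec {K : List Int} (hK : K.Nodup) {h : Int → Nat} {p c : PySem.Dict Int Int}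
    {fuel : Nat} (hinv : INV K h p c) {a b : Int} (ha : a ∈ K) (hb : b ∈ K)
    (hfuel : K.length < fuel) :
    ∃ h', INV K h' (unionA fuel p a b)
      (if c.getD a a ≠ c.getD b b then relabelB c (c.getD a a) (c.getD b b) else c) := by
  have hfuel' : ∀ x : Int, (K.filter (fun j => decide (h j < h x))).length < fuel :=
    fun x => lt_of_le_of_lt (List.length_filter_le _ _) hfuel
  obtain ⟨f1, i1, m1⟩ := findA_spec c h fuel p a hinv ha (hfuel' a)
  obtain ⟨f2, i2, m2⟩ := findA_spec c h fuel (findA fuel p a).2 b i1 hb (hfuel' b)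
  have i2' := i2
  obtain ⟨k2p, k2c, cl2, lab12, lab22, rootc2, dec2⟩ := i2'
  have hia : pf c (pf c a) = pf c a := pf_label_idem hinv ha
  have hib : pf c (pf c b) = pf c b := pf_label_idem hinv hb
  have hcaK : pf c a ∈ K := (rootc2 a ha).1
  have hcbK : pf c b ∈ K := (rootc2 b hb).1
  have hcnd : c.keys.Nodup := k2c ▸ hK
  rw [show (if c.getD a a ≠ c.getD b b then relabelB c (c.getD a a) (c.getD b b) else c)
      = (if pf c a ≠ pf c b then relabelB c (pf c a) (pf c b) else c) from rfl]
  by_cases hab : pf c a = pf c b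
  · refine ⟨h, ?_⟩
    rw [if_neg (fun hne => hne hab)]
    simp only [unionA, f1, f2]
    rw [if_neg (fun hne => hne hab)]
    exact i2
  · have hab' : pf c a ≠ pf c b := hab
    rw [if_pos hab']
    simp only [unionA, f1, f2]
    rw [if_pos hab']
    set p2 := (findA fuel (findA fuel p a).2 b).2 with hp2
    have hra : pf p2 (pf c a) = pf c a := (rootc2 a ha).2
    have hrb : pf p2 (pf c b) = pf c b := (rootc2 b hb).2
    have hpfc' : ∀ j, pf (relabelB c (pf c a) (pf c b)) j =
        if pf c j = pf c a then pf c b else pf c j := by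
      intro j
      by_cases hjK : j ∈ K
      · exact relabel_pf hcnd _ _ (k2c ▸ hjK)
      · have h1 : pf c j = j := pf_not_mem k2c hjK
        have h2 : pf (relabelB c (pf c a) (pf c b)) j = j :=
          pf_not_mem (by rw [relabel_keys hcnd]; exact k2c) hjK
        rw [h1, h2, if_neg (show ¬(j = pf c a) from fun he => hjK (by rw [he]; exact hcaK))]
    have hpfp' : ∀ j, pf (p2.insert (pf c a) (pf c b)) j =
        if j = pf c a then pf c b else pf p2 j := by
      intro j; rw [pf, PySem.Dict.getD_insert]; rfl
    refine ⟨(fun j => if pf c j = pf c a then h j + h (pf c b) + 1 else h j),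
      ?_, ?_, ?_, ?_, ?_, ?_, ?_⟩
    · rw [PySem.Dict.keys_insert_of_contains _ _
        ((PySem.Dict.contains_iff_mem_keys _ _).mpr (k2p ▸ hcaK))]
      exact k2p
    · rw [relabel_keys hcnd]; exact k2c
    · intro j hj
      rw [hpfp' j]
      split
      · exact hcbK
      · exact cl2 j hj
    · intro j hj
      rw [hpfp' j]
      by_cases hj_ca : j = pf c a
      · rw [if_pos hj_ca, hpfc' (pf c b), hpfc' j, hib,
          if_neg (fun he => hab' he.symm), hj_ca, hia, if_pos rfl]
      · rw [if_neg hj_ca, hpfc' (pf p2 j), hpfc' j, lab12 j hj]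
    · intro j hj hfix
      rw [hpfp' j] at hfix
      by_cases hj_ca : j = pf c a
      · rw [if_pos hj_ca] at hfix
        exact absurd (hfix.trans hj_ca) (fun he => hab' he.symm)
      · rw [if_neg hj_ca] at hfix
        have hcj : pf c j = j := lab22 j hj hfix
        rw [hpfc' j, hcj, if_neg hj_ca]
    · intro j hj
      rw [hpfc' j]
      by_cases hcj : pf c j = pf c a
      · rw [if_pos hcj]
        refine ⟨hcbK, ?_⟩
        rw [hpfp' (pf c b), if_neg (fun he => hab' he.symm)]
        exact hrb
      · rw [if_neg hcj]
        refine ⟨(rootc2 j hj).1, ?_⟩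
        rw [hpfp' (pf c j), if_neg hcj]
        exact (rootc2 j hj).2
    · intro j hj hne
      rw [hpfp' j] at hne ⊢
      by_cases hj_ca : j = pf c a
      · rw [if_pos hj_ca] at hne ⊢
        rw [hj_ca]
        simp only [hib, hia]
        rw [if_neg (fun he => hab' (Eq.symm he))]
        simp only [if_true]
        omega
      · rw [if_neg hj_ca] at hne ⊢
        have hd : h (pf p2 j) < h j := dec2 j hj hne
        have hl : pf c (pf p2 j) = pf c j := lab12 j hj
        simp only [hl]
        split <;> omega

lemma stepB_fst (st : PySem.Dict Int Int × PySem.Dict Int Int) (e : List Int) :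
    (stepB st e).1 = degStep st.1 e := by
  cases e with
  | nil => rfl
  | cons a t =>
    cases t with
    | nil => rfl
    | cons b t2 => cases t2 with
      | nil => rfl
      | cons x t3 => rfl

lemma stepB_snd (st : PySem.Dict Int Int × PySem.Dict Int Int) (e : List Int) :
    (stepB st e).2 = compStep st.2 e := by
  cases e with
  | nil => rfl
  | cons a t =>
    cases t with
    | nil => rfl
    | cons b t2 => cases t2 with
      | nil => rfl
      | cons x t3 => rfl

lemma foldl_stepB (es : List (List Int)) :
    ∀ dg cm, es.foldl stepB (dg, cm) =
      (es.foldl degStep dg, es.foldl compStep cm) := by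
  induction es with
  | nil => intro dg cm; rfl
  | cons e es ih =>
    intro dg cm
    simp only [List.foldl_cons]
    rw [show stepB (dg, cm) e = ((stepB (dg, cm) e).1, (stepB (dg, cm) e).2) from rfl,
        stepB_fst, stepB_snd, ih]

lemma fold_edges {K : List Int} (hK : K.Nodup) {F : Nat} (hF : K.length < F) :
    ∀ (es : List (List Int)) (p c : PySem.Dict Int Int) (h : Int → Nat), INV K h p c →
      (∀ e ∈ es, e.length = 2 ∧ ∀ x ∈ e, x ∈ K) →
      ∃ h', INV K h'
        (es.foldl (fun p e => match e with | [a, b] => unionA F p a b | _ => p) p)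
        (es.foldl compStep c) := by
  intro es
  induction es with
  | nil => intro p c h hinv _; exact ⟨h, hinv⟩
  | cons e es ih =>
    intro p c h hinv hok
    obtain ⟨hlen, hmem⟩ := hok e (List.mem_cons_self)
    match e, hlen with
    | [a, b], _ =>
      simp only [List.foldl_cons]
      obtain ⟨h', hinv'⟩ := unionA_spec hK hinv (hmem a (by simp)) (hmem b (by simp)) hF
      exact ih _ _ h' hinv' (fun e' he' => hok e' (List.mem_cons_of_mem _ he'))

lemma stats_fold {K : List Int} {F : Nat} (hF : K.length < F)
    (c dg : PySem.Dict Int Int) :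
    ∀ (ns : List Int) (s : PySem.Dict Int (Int × Int)) (p : PySem.Dict Int Int)
      (h : Int → Nat), INV K h p c → (∀ v ∈ ns, v ∈ K) →
      (ns.foldl (fun (sp : PySem.Dict Int (Int × Int) × PySem.Dict Int Int) v =>
        let rp := findA F sp.2 v
        let s1 := if sp.1.contains rp.1 then sp.1 else sp.1.insert rp.1 (0, 0)
        let s2 := if PySem.Int.mod v 2 = PySem.Int.mod (dg.getD v 0) 2
          then s1.modify rp.1 (0, 0) (fun t => (t.1 + 1, t.2))
          else s1.modify rp.1 (0, 0) (fun t => (t.1, t.2 + 1))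
        (s2, rp.2)) (s, p)).1 =
      ns.foldl (fun (s : PySem.Dict Int (Int × Int)) v =>
        let cv := c.getD v v
        let s1 := if s.contains cv then s else s.insert cv (0, 0)
        let t := s1.getD cv (0, 0)
        if PySem.Int.mod v 2 = PySem.Int.mod (dg.getD v 0) 2
          then s1.insert cv (t.1 + 1, t.2)
          else s1.insert cv (t.1, t.2 + 1)) s := by
  intro ns
  induction ns with
  | nil => intro s p h _ _; rfl
  | cons v ns ih =>
    intro s p h hinv hmemall
    have hv : v ∈ K := hmemall v (List.mem_cons_self)
    have hcnt : (K.filter (fun j => decide (h j < h v))).length < F :=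
      lt_of_le_of_lt (List.length_filter_le _ _) hF
    obtain ⟨f1, i1, _⟩ := findA_spec c h F p v hinv hv hcnt
    simp only [List.foldl_cons, f1]
    exact ih _ _ h i1 (fun w hw => hmemall w (List.mem_cons_of_mem _ hw))

lemma count_fold (l : List (Int × Int)) :
    ∀ h0 r0 : Int, l.foldl (fun (hr : Int × Int) t =>
      ((if t.1 = 1 then hr.1 + 1 else hr.1), (if t.2 = 1 then hr.2 + 1 else hr.2))) (h0, r0) =
      (h0 + (l.countP (fun t => t.1 == 1) : Int), r0 + (l.countP (fun t => t.2 == 1) : Int)) := by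
  induction l with
  | nil => intro h0 r0; simp
  | cons t l ih =>
    intro h0 r0
    simp only [List.foldl_cons, List.countP_cons, ih]
    by_cases h1 : t.1 = 1 <;> by_cases h2 : t.2 = 1 <;>
      simp [h1, h2, Prod.ext_iff] <;> omega

lemma id_fold_getD (ns : List Int) :
    ∀ (d : PySem.Dict Int Int), (∀ k, d.getD k k = k) →
      ∀ k, (ns.foldl (fun d v => d.insert v v) d).getD k k = k := by
  induction ns with
  | nil => intro d hd k; exact hd k
  | cons v ns ih =>
    intro d hd k
    simp only [List.foldl_cons]
    refine ih _ (fun k => ?_) k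
    rw [PySem.Dict.getD_insert]
    split <;> simp_all

lemma INV_init (nodes : List Int) :
    INV (PySem.Set.ofList nodes) (fun _ => 0)
      (nodes.foldl (fun d v => d.insert v v) PySem.Dict.empty)
      (nodes.foldl (fun d v => d.insert v v) PySem.Dict.empty) := by
  have hkeys : (nodes.foldl (fun d v => d.insert v v) PySem.Dict.empty).keys
      = PySem.Set.ofList nodes := by
    rw [PySem.Dict.keys_foldl_insert, PySem.Dict.keys_empty, PySem.Set.update_nil_left]
  have hid : ∀ k, pf (nodes.foldl (fun d v => d.insert v v) PySem.Dict.empty) k = k :=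
    id_fold_getD nodes PySem.Dict.empty (fun k => PySem.Dict.getD_empty k k)
  refine ⟨hkeys, hkeys, ?_, ?_, ?_, ?_, ?_⟩
  · intro k hk; rw [hid]; exact hk
  · intro k hk; rw [hid]
  · intro k hk _; exact hid k
  · intro k hk; rw [hid]; exact ⟨hk, hid k⟩
  · intro k hk hne; exact absurd (hid k) hne

-- ===== VERDICT (by name: the statement is the Claim_ definition above) =====
theorem solution_spec : Claim_equal_solution := by
  intro nodes edges _ hpre
  unfold Spec_solution
  have hK : (PySem.Set.ofList nodes).Nodup := PySem.Set.nodup_ofList nodes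
  have hF : (PySem.Set.ofList nodes).length < nodes.length + 1 :=
    Nat.lt_succ_of_le (PySem.Set.length_ofList_le nodes)
  have hok : ∀ e ∈ edges, e.length = 2 ∧ ∀ x ∈ e, x ∈ PySem.Set.ofList nodes :=
    fun e he => ⟨(hpre e he).1,
      fun x hx => (PySem.Set.mem_ofList _ _).mpr ((hpre e he).2 x hx)⟩
  have hinv0 := INV_init nodes
  obtain ⟨h1, hinv1⟩ := fold_edges hK hF edges _ _ _ hinv0 hok
  have hstats := stats_fold hF
    (edges.foldl compStep (nodes.foldl (fun d v => d.insert v v) PySem.Dict.empty))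
    (edges.foldl degStep (nodes.foldl (fun d v => d.insert v 0) PySem.Dict.empty))
    nodes PySem.Dict.empty _ h1 hinv1
    (fun w hw => (PySem.Set.mem_ofList _ _).mpr hw)
  simp only [solution, solution_alt, foldl_stepB]
  rw [hstats, count_fold]
  simp
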